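-- pv_equiv track=rewrite | github.com/Alekat13/FoxCommander | Algorithm NashQ for Gridworld_learn_PUBLIC.py | get_stateFox
-- ===== SOURCE A (Python) =====
-- def get_stateFox(agent_id, gridWorld, gridIndexes):
--
--     state = 0
--
--     if agent_id == 0:
--         for i in range(len(gridWorld)):
--             for j in range(len(gridWorld[i])):
--                 if gridWorld[i][j] == 1:
--                     state = gridIndexes[i][j]
--
--     if agent_id == 1:
--         for i in range(len(gridWorld)):
--             for j in range(len(gridWorld[i])):
--                 if gridWorld[i][j] == 2:
--                     state = gridIndexes[i][j]
--
--     return state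
-- ===== SOURCE B (Python) =====
-- def get_stateFox(agent_id, gridWorld, gridIndexes):
--     if agent_id not in (0, 1):
--         return 0
--     marker = agent_id + 1
--     for i in range(len(gridWorld) - 1, -1, -1):
--         row = gridWorld[i]
--         for j in range(len(row) - 1, -1, -1):
--             if row[j] == marker:
--                 return gridIndexes[i][j]
--     return 0
-- ===== Notes on version B (the rewrite author's own statement) =====
-- stated objective: alternative
-- what changed: B scans the grid backwards and returns at the first match (the last forward match A keeps), instead of scanning everything and overwriting a state variable; it also handles both agent ids with one parametrized marker instead of two duplicated loop blocks.
import Mathlib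
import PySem

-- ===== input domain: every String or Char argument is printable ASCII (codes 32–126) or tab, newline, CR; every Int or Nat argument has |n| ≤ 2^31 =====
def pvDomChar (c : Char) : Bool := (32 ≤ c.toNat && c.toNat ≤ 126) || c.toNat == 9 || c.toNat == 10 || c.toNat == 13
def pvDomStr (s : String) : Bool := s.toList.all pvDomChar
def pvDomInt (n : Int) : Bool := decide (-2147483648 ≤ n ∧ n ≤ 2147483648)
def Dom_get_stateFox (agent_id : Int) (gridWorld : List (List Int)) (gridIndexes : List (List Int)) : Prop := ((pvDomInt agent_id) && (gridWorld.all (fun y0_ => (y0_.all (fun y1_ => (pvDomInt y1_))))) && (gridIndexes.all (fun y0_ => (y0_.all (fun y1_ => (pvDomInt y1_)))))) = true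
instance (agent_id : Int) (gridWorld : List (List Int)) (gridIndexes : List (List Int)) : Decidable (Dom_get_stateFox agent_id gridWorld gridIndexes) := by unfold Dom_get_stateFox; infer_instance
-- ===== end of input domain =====

-- B replaces A's "scan everything forwards and keep the last hit" by a backward scan with
-- early return at the first hit, with one parametrized marker instead of two duplicated blocks
-- (objective: alternative decomposition, not measured faster).

-- ===== PORT A =====
-- A's two duplicated loop blocks share this shape (marker = 1 resp. 2): nested foldl over
-- index ranges, overwriting the state at every matching cell.  gridIndexes[i][j] is read with
-- getD 0; exact wherever Python does not raise, i.e. on Pre_get_stateFox (index valid at every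
-- matching cell).
def pvScanA (marker : Int) (gridWorld gridIndexes : List (List Int)) (st0 : Int) : Int :=
  (List.range gridWorld.length).foldl (fun state i =>
    let row := gridWorld.getD i []
    (List.range row.length).foldl (fun st j =>
      if row.getD j 0 = marker then (gridIndexes.getD i []).getD j 0 else st) state) st0

def get_stateFox (agent_id : Int) (gridWorld : List (List Int)) (gridIndexes : List (List Int)) : Int :=
  let state : Int := 0
  let state := if agent_id = 0 then pvScanA 1 gridWorld gridIndexes state else state
  let state := if agent_id = 1 then pvScanA 2 gridWorld gridIndexes state else state
  state

-- ===== PORT B =====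
-- Source B's inner loop: j runs over range(len(row)-1, -1, -1) (here: (List.range …).reverse),
-- returning the first j with row[j] == marker.
def pvRowScanB (marker : Int) (row : List Int) : List Nat → Option Nat
  | [] => none
  | j :: rest => if row.getD j 0 = marker then some j else pvRowScanB marker row rest

-- Source B's outer loop: i runs backwards over the rows; first row with a hit wins.
def pvGridScanB (marker : Int) (gridWorld : List (List Int)) : List Nat → Option (Nat × Nat)
  | [] => none
  | i :: rest =>
      let row := gridWorld.getD i []
      match pvRowScanB marker row (List.range row.length).reverse with
      | some j => some (i, j)
      | none => pvGridScanB marker gridWorld rest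

def get_stateFox_alt (agent_id : Int) (gridWorld : List (List Int)) (gridIndexes : List (List Int)) : Int :=
  if agent_id = 0 ∨ agent_id = 1 then
    let marker := agent_id + 1
    match pvGridScanB marker gridWorld (List.range gridWorld.length).reverse with
    | some (i, j) => (gridIndexes.getD i []).getD j 0   -- gridIndexes[i][j]; exact on Pre_
    | none => 0
  else 0

-- ===== PRECONDITION & SPEC =====
-- Pre_ excludes exactly the inputs on which Python A raises IndexError: a cell of gridWorld
-- equal to the agent's marker whose position is out of range in gridIndexes.
def Pre_get_stateFox (agent_id : Int) (gridWorld : List (List Int)) (gridIndexes : List (List Int)) : Prop :=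
  (agent_id = 0 ∨ agent_id = 1) →
    ∀ i < gridWorld.length, ∀ j < (gridWorld.getD i []).length,
      (gridWorld.getD i []).getD j 0 = agent_id + 1 →
        i < gridIndexes.length ∧ j < (gridIndexes.getD i []).length
instance (agent_id : Int) (gridWorld : List (List Int)) (gridIndexes : List (List Int)) : Decidable (Pre_get_stateFox agent_id gridWorld gridIndexes) := by unfold Pre_get_stateFox; infer_instance

def pvWitness_get_stateFox : Int × List (List Int) × List (List Int) := (0, [[0, 1], [2, 0]], [[10, 11], [12, 13]])

def Spec_get_stateFox (agent_id : Int) (gridWorld : List (List Int)) (gridIndexes : List (List Int)) (out : Int) : Prop := out = get_stateFox_alt agent_id gridWorld gridIndexes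
instance (agent_id : Int) (gridWorld : List (List Int)) (gridIndexes : List (List Int)) (out : Int) : Decidable (Spec_get_stateFox agent_id gridWorld gridIndexes out) := by unfold Spec_get_stateFox; infer_instance

-- ===== CLAIM (what is proved, stated in full; the proofs are below) =====
def Claim_equal_get_stateFox : Prop := ∀ (agent_id : Int) (gridWorld : List (List Int)) (gridIndexes : List (List Int)), Dom_get_stateFox agent_id gridWorld gridIndexes → Pre_get_stateFox agent_id gridWorld gridIndexes → Spec_get_stateFox agent_id gridWorld gridIndexes (get_stateFox agent_id gridWorld gridIndexes)

-- ===== LEMMAS AND PROOFS =====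

-- "keep the last hit while folding forwards" = "first hit of the reversed list".
lemma foldl_keepLast (c : Nat → Bool) (g : Nat → Int) :
    ∀ (l : List Nat) (st0 : Int),
      l.foldl (fun st j => if c j then g j else st) st0
        = (l.reverse.find? c).elim st0 g := by
  intro l
  induction l with
  | nil => intro st0; simp
  | cons a l ih =>
      intro st0
      simp only [List.foldl_cons, List.reverse_cons, List.find?_append, ih]
      cases h : (l.reverse).find? c with
      | some j => simp
      | none =>
          cases hc : c a <;> simp [List.find?, hc]

lemma rowScanB_eq_find? (marker : Int) (row : List Int) :
    ∀ (l : List Nat),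
      pvRowScanB marker row l = l.find? (fun j => decide (row.getD j 0 = marker)) := by
  intro l
  induction l with
  | nil => rfl
  | cons a l ih =>
      simp only [pvRowScanB, ih]
      by_cases h : row.getD a 0 = marker
      · rw [if_pos h, List.find?_cons_of_pos (by simpa using h)]
      · rw [if_neg h, List.find?_cons_of_neg (by simpa using h)]

-- Value of the inner forward scan of A, in terms of the backward row scan.
lemma innerA_eq (marker : Int) (row : List Int) (g : Nat → Int) (st0 : Int) :
    (List.range row.length).foldl (fun st j => if row.getD j 0 = marker then g j else st) st0
      = (pvRowScanB marker row (List.range row.length).reverse).elim st0 g := by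
  rw [rowScanB_eq_find? marker row]
  have := foldl_keepLast (fun j => decide (row.getD j 0 = marker)) g (List.range row.length) st0
  simpa using this

-- The whole of A's scan equals B's backward grid scan.
lemma scanA_eq (marker : Int) (gw gi : List (List Int)) :
    ∀ (l : List Nat) (st0 : Int),
      l.foldl (fun state i =>
          (List.range (gw.getD i []).length).foldl (fun st j =>
            if (gw.getD i []).getD j 0 = marker then (gi.getD i []).getD j 0 else st) state) st0
        = (match pvGridScanB marker gw l.reverse with
           | some (i, j) => (gi.getD i []).getD j 0
           | none => st0) := by
  intro l
  induction l with
  | nil => intro st0; simp [pvGridScanB]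
  | cons a l ih =>
      intro st0
      simp only [List.foldl_cons, List.reverse_cons]
      rw [ih, innerA_eq]
      -- split on whether any later index (in l.reverse) hits, then on row a
      have hsplit : ∀ (tl : List Nat),
          pvGridScanB marker gw (tl ++ [a])
            = (match pvGridScanB marker gw tl with
               | some p => some p
               | none =>
                  match pvRowScanB marker (gw.getD a []) (List.range (gw.getD a []).length).reverse with
                  | some j => some (a, j)
                  | none => none) := by
        intro tl
        induction tl with
        | nil =>
            simp only [List.nil_append, pvGridScanB]
        | cons b tl ihtl =>
            simp only [List.cons_append, pvGridScanB]
            cases pvRowScanB marker (gw.getD b []) (List.range (gw.getD b []).length).reverse <;> simp [ihtl]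
      rw [hsplit]
      cases hgs : pvGridScanB marker gw l.reverse with
      | some p => cases hr : pvRowScanB marker (gw.getD a []) (List.range (gw.getD a []).length).reverse <;> simp
      | none => cases hr : pvRowScanB marker (gw.getD a []) (List.range (gw.getD a []).length).reverse <;> simp

-- ===== VERDICT (by name: the statement is the Claim_ definition above) =====
theorem get_stateFox_spec : Claim_equal_get_stateFox := by
  intro agent_id gw gi _ _
  unfold Spec_get_stateFox get_stateFox get_stateFox_alt pvScanA
  by_cases h0 : agent_id = 0
  · subst h0
    norm_num
    have key := scanA_eq 1 gw gi (List.range gw.length) 0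
    simp only [List.getD_eq_getElem?_getD] at key
    rw [key]
  · by_cases h1 : agent_id = 1
    · subst h1
      norm_num
      have key := scanA_eq 2 gw gi (List.range gw.length) 0
      simp only [List.getD_eq_getElem?_getD] at key
      rw [key]
    · simp [h0, h1]
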